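-- pv_equiv track=rewrite | github.com/fpaez7/data | Actividades-Paez/Indices y Joins/nested.py | nested_loop_join
-- ===== SOURCE A (Python) =====
-- def nested_loop_join(usuarios,movies,favoritos):
--     j=[]
--     for usuario in usuarios:
--         for favorito in favoritos:
--             for movie in movies:
--                 if usuario[0] == favorito[0]  and favorito[1]== movie[0]:
--                     j.append((usuario[1],favorito[0],movie[0],movie[1]))
--     return j
-- ===== SOURCE B (Python) =====
-- def nested_loop_join(usuarios, movies, favoritos):
--     # Hash join: index movies by id and favoritos by user id, then one pass over usuarios.
--     movies_by_id = {}
--     for mid, title in movies: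
--         movies_by_id.setdefault(mid, []).append(title)
--     favs_by_user = {}
--     for uid, mid in favoritos:
--         favs_by_user.setdefault(uid, []).append(mid)
--     j = []
--     for uid, name in usuarios:
--         for mid in favs_by_user.get(uid, []):
--             for title in movies_by_id.get(mid, []):
--                 j.append((name, uid, mid, title))
--     return j
-- ===== Notes on version B (the rewrite author's own statement) =====
-- stated objective: faster
-- what changed: Replaced the triple nested scan by a hash join: movies indexed by id and favoritos by user id once, then a single pass over usuarios with dictionary lookups.
import Mathlib
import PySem

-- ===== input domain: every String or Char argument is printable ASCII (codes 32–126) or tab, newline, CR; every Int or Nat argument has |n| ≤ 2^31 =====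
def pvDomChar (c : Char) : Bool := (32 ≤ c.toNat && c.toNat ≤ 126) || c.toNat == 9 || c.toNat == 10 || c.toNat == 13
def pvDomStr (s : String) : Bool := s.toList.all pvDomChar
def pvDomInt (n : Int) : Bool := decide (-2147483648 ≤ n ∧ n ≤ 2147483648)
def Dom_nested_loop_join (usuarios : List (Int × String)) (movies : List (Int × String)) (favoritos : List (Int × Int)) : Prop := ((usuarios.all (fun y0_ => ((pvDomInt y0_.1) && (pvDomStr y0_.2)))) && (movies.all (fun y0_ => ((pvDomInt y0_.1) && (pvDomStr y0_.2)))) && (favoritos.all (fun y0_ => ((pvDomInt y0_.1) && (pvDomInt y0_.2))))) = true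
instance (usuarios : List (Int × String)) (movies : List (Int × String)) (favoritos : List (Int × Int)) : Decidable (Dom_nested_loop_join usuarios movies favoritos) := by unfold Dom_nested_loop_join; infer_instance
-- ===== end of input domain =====

-- B replaces A's triple nested scan by a hash join (movies indexed by id, favoritos by
-- user id, one pass over usuarios); same return value, asymptotically faster.

-- ===== PORT A =====
def nested_loop_join (usuarios : List (Int × String)) (movies : List (Int × String)) (favoritos : List (Int × Int)) : List (String × Int × Int × String) :=
  usuarios.foldl (fun j usuario =>
    favoritos.foldl (fun j favorito =>
      movies.foldl (fun j movie =>
        if usuario.1 == favorito.1 && favorito.2 == movie.1 then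
          j ++ [(usuario.2, favorito.1, movie.1, movie.2)]
        else j) j) j) []

-- ===== PORT B =====
-- 'd.setdefault(k, []).append(v)' ported as the value-equal 'd[k] = d.get(k, []) + [v]'
def pvGroupByFst {α : Type} (l : List (Int × α)) : PySem.Dict Int (List α) :=
  l.foldl (fun d p => d.modify p.1 [] (· ++ [p.2])) PySem.Dict.empty

def nested_loop_join_alt (usuarios : List (Int × String)) (movies : List (Int × String)) (favoritos : List (Int × Int)) : List (String × Int × Int × String) :=
  let moviesById := pvGroupByFst movies
  let favsByUser := pvGroupByFst favoritos
  usuarios.foldl (fun j usuario =>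
    (favsByUser.getD usuario.1 []).foldl (fun j mid =>
      (moviesById.getD mid []).foldl (fun j title =>
        j ++ [(usuario.2, usuario.1, mid, title)]) j) j) []

-- ===== PRECONDITION & SPEC =====
def Spec_nested_loop_join (usuarios : List (Int × String)) (movies : List (Int × String)) (favoritos : List (Int × Int)) (out : List (String × Int × Int × String)) : Prop := out = nested_loop_join_alt usuarios movies favoritos
instance (usuarios : List (Int × String)) (movies : List (Int × String)) (favoritos : List (Int × Int)) (out : List (String × Int × Int × String)) : Decidable (Spec_nested_loop_join usuarios movies favoritos out) := by unfold Spec_nested_loop_join; infer_instance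

-- ===== CLAIM (what is proved, stated in full; the proofs are below) =====
def Claim_equal_nested_loop_join : Prop := ∀ (usuarios : List (Int × String)) (movies : List (Int × String)) (favoritos : List (Int × Int)), Dom_nested_loop_join usuarios movies favoritos → Spec_nested_loop_join usuarios movies favoritos (nested_loop_join usuarios movies favoritos)

-- ===== LEMMAS AND PROOFS =====

-- innermost loop: A's scan of movies for one favorite = B's map over the index bucket
lemma inner_movies (name : String) (u1 mid : Int) (m : List (Int × String)) :
    (m.filter (fun mv => mid == mv.1)).map (fun mv => (name, u1, mv.1, mv.2))
      = ((m.filter (fun p => p.1 == mid)).map (·.2)).map (fun t => (name, u1, mid, t)) := by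
  induction m with
  | nil => rfl
  | cons mv rest ih =>
    obtain ⟨a, b⟩ := mv
    by_cases h : a = mid
    · subst h; simp [ih]
    · have h1 : (mid == a) = false := beq_eq_false_iff_ne.mpr (Ne.symm h)
      have h2 : (a == mid) = false := beq_eq_false_iff_ne.mpr h
      simp [h1, h2, ih]

-- middle loop: A's scan of favoritos for one user = B's pass over the user's bucket
lemma mid_favs (name : String) (u1 : Int) (m : List (Int × String)) (f : List (Int × Int)) :
    f.flatMap (fun fav =>
        (m.filter (fun mv => u1 == fav.1 && fav.2 == mv.1)).map
          (fun mv => (name, fav.1, mv.1, mv.2)))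
      = ((f.filter (fun p => p.1 == u1)).map (·.2)).flatMap (fun mid =>
          ((m.filter (fun p => p.1 == mid)).map (·.2)).map (fun t => (name, u1, mid, t))) := by
  induction f with
  | nil => rfl
  | cons fav rest ih =>
    obtain ⟨f1, f2⟩ := fav
    by_cases h : f1 = u1
    · subst h
      simp only [List.flatMap_cons, List.filter_cons, beq_self_eq_true, if_pos,
        Bool.true_and, List.map_cons, ih, ← inner_movies name f1 f2 m]
    · have h1 : (u1 == f1) = false := beq_eq_false_iff_ne.mpr (Ne.symm h)
      have h2 : (f1 == u1) = false := beq_eq_false_iff_ne.mpr h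
      simp [h1, h2, ih]

-- ===== VERDICT (by name: the statement is the Claim_ definition above) =====
theorem nested_loop_join_spec : Claim_equal_nested_loop_join := by
  intro usuarios movies favoritos _
  unfold Spec_nested_loop_join nested_loop_join nested_loop_join_alt pvGroupByFst
  simp only [PySem.List.foldl_append_if, PySem.List.foldl_append_singleton_eq_map,
    PySem.List.foldl_append_eq_flatMap, PySem.Dict.getD_foldl_modify_append,
    PySem.Dict.getD_empty, List.nil_append]
  rw [show (fun (x : Int × String) =>
      favoritos.flatMap fun fav =>
        (movies.filter fun mv => x.1 == fav.1 && fav.2 == mv.1).map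
          fun mv => (x.2, fav.1, mv.1, mv.2))
    = (fun (x : Int × String) =>
      ((favoritos.filter fun p => p.1 == x.1).map (·.2)).flatMap fun mid =>
        ((movies.filter fun p => p.1 == mid).map (·.2)).map fun t => (x.2, x.1, mid, t))
    from funext fun x => mid_favs x.2 x.1 movies favoritos]
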